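-- pv_equiv track=rewrite | github.com/release-engineering/pubtools-quay | pubtools/_quay/image_untagger.py | get_lost_digests
-- ===== SOURCE A (Python) =====
-- from typing import cast, List, Dict, Optional, Tuple, Union
--
-- def get_lost_digests(
--
--     tags: List[str],
--     tag_digest_mapping: Dict[str, List[str]],
--     digest_tag_mapping: Dict[str, List[str]],
-- ) -> List[str]:
--     """
--     Calculate a list of digests that would be lost if the provided tags were removed.
--
--     Args:
--         tags ([str]):
--             List of tags that would be removed from a repo.
--         tag_digest_mapping ({str: [str]}):
--             Mapping of which digests are referenced by a given tag.
--         digest_tag_mapping ({str: [str]}):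
--             Mapping of which tags reference a given digest.
--
--     Returns ([str]):
--         Digests that would be lost if given tags were removed.
--     """
--     remove_digests = []
--     lost_digests = []
--     for tag in tags:
--         for digest in tag_digest_mapping.get(tag, []):
--             if digest not in remove_digests:
--                 remove_digests.append(digest)
--
--     for digest in remove_digests:
--         # which tags would remain referencing a given digest?
--         remaining_tags = set(digest_tag_mapping[digest]) - set(tags)
--         if len(remaining_tags) == 0:
--             lost_digests.append(digest)
--
--     return lost_digests
-- ===== SOURCE B (Python) =====
-- def get_lost_digests(tags, tag_digest_mapping, digest_tag_mapping):
--     tags_set = set(tags)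
--     # digests that keep at least one referencing tag after removal, from one scan of the mapping
--     safe = {digest for digest, ref_tags in digest_tag_mapping.items()
--             if any(t not in tags_set for t in ref_tags)}
--     candidates = dict.fromkeys(
--         digest for tag in tags for digest in tag_digest_mapping.get(tag, []))
--     return [digest for digest in candidates if digest not in safe]
-- ===== Notes on version B (the rewrite author's own statement) =====
-- stated objective: simpler
-- what changed: Instead of A's per-candidate dict indexing and set difference, B computes in one scan over digest_tag_mapping.items() the set of 'safe' digests (those with a surviving referencing tag), dedups the referenced digests with dict.fromkeys over a flattened generator, and returns the candidates not in 'safe'; B never indexes digest_tag_mapping.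
-- outside the precondition, e.g. on get_lost_digests(['t1'], {'t1': ['d1']}, {}): A raises KeyError, B returns ['d1']
import Mathlib
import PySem

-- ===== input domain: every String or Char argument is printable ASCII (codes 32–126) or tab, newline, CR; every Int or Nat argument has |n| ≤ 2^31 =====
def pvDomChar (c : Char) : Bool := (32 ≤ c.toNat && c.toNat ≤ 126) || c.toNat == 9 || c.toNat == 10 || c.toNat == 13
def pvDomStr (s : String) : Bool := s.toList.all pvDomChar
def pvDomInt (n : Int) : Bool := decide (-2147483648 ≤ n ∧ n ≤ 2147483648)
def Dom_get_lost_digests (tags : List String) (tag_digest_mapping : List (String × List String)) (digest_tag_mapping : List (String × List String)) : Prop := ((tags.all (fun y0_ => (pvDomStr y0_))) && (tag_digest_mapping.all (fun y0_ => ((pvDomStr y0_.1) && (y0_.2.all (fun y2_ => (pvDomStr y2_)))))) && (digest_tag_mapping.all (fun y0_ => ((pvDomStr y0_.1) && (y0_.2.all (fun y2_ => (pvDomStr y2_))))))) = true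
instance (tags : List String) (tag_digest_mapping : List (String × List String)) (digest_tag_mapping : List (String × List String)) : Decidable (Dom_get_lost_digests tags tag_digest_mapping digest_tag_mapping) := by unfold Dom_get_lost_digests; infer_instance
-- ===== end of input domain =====

-- B replaces A's per-candidate dict lookup and set difference by one scan of digest_tag_mapping
-- computing the set of surviving ("safe") digests, a dict.fromkeys dedup, and a final filter
-- (objective: simpler).

-- ===== PORT A =====
-- A, pass 1: collect referenced digests, dedup by list membership, encounter order.
def pvRemoveDigests (tags : List String) (tag_digest_mapping : List (String × List String)) : List String :=
  tags.foldl (fun acc tag =>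
    (PySem.Dict.getD ⟨tag_digest_mapping⟩ tag []).foldl (fun acc digest =>
      if digest ∈ acc then acc else acc ++ [digest]) acc) []

def get_lost_digests (tags : List String) (tag_digest_mapping : List (String × List String)) (digest_tag_mapping : List (String × List String)) : List String :=
  (pvRemoveDigests tags tag_digest_mapping).foldl (fun lost digest =>
    match PySem.Dict.get? (⟨digest_tag_mapping⟩ : PySem.Dict String (List String)) digest with
    | none => lost   -- Python raises KeyError here; excluded by Pre_
    | some ts =>
      if PySem.Set.len (PySem.Set.diff (PySem.Set.ofList ts) (PySem.Set.ofList tags)) = 0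
      then lost ++ [digest] else lost) []

-- ===== PORT B =====
def get_lost_digests_alt (tags : List String) (tag_digest_mapping : List (String × List String)) (digest_tag_mapping : List (String × List String)) : List String :=
  let tags_set : PySem.Set String := PySem.Set.ofList tags
  -- set comprehension over digest_tag_mapping.items(): digests with a surviving referencing tag
  let safe : PySem.Set String :=
    PySem.Set.ofList ((digest_tag_mapping.filter
      (fun p => p.2.any (fun t => !(PySem.Set.contains tags_set t)))).map Prod.fst)
  -- dict.fromkeys over the flattened generator = ordered dedup
  let candidates : List String :=
    PySem.List.dedup (tags.flatMap (fun tag => PySem.Dict.getD ⟨tag_digest_mapping⟩ tag []))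
  candidates.filter (fun digest => !(PySem.Set.contains safe digest))

-- ===== PRECONDITION & SPEC =====
-- Pre_ excludes (a) exactly the inputs where Python A raises KeyError — a digest referenced by a
-- given tag but absent from digest_tag_mapping — and (b) association lists whose digest_tag_mapping
-- has duplicate keys, which a Python dict argument cannot have (no Python call is excluded by (b)).
def Pre_get_lost_digests (tags : List String) (tag_digest_mapping : List (String × List String)) (digest_tag_mapping : List (String × List String)) : Prop :=
  (∀ tag ∈ tags, ∀ d ∈ PySem.Dict.getD ⟨tag_digest_mapping⟩ tag [],
    (PySem.Dict.get? (⟨digest_tag_mapping⟩ : PySem.Dict String (List String)) d).isSome)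
  ∧ (digest_tag_mapping.map Prod.fst).Nodup
instance (tags : List String) (tag_digest_mapping : List (String × List String)) (digest_tag_mapping : List (String × List String)) : Decidable (Pre_get_lost_digests tags tag_digest_mapping digest_tag_mapping) := by unfold Pre_get_lost_digests; infer_instance

def pvWitness_get_lost_digests : List String × (List (String × List String)) × (List (String × List String)) :=
  (["t1", "t2"], [("t1", ["d1", "d2"]), ("t2", ["d1"])], [("d1", ["t1", "t2"]), ("d2", ["t2", "t3"])])

def Spec_get_lost_digests (tags : List String) (tag_digest_mapping : List (String × List String)) (digest_tag_mapping : List (String × List String)) (out : List String) : Prop := out = get_lost_digests_alt tags tag_digest_mapping digest_tag_mapping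
instance (tags : List String) (tag_digest_mapping : List (String × List String)) (digest_tag_mapping : List (String × List String)) (out : List String) : Decidable (Spec_get_lost_digests tags tag_digest_mapping digest_tag_mapping out) := by unfold Spec_get_lost_digests; infer_instance

-- ===== CLAIM =====
def Claim_equal_get_lost_digests : Prop := ∀ (tags : List String) (tag_digest_mapping : List (String × List String)) (digest_tag_mapping : List (String × List String)), Dom_get_lost_digests tags tag_digest_mapping digest_tag_mapping → Pre_get_lost_digests tags tag_digest_mapping digest_tag_mapping → Spec_get_lost_digests tags tag_digest_mapping digest_tag_mapping (get_lost_digests tags tag_digest_mapping digest_tag_mapping)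

-- ===== LEMMAS AND PROOFS =====

-- the shared "would be lost" test (false where Python raises KeyError — outside Pre_)
def pvCond (tags : List String) (digest_tag_mapping : List (String × List String)) (d : String) : Bool :=
  match PySem.Dict.get? (⟨digest_tag_mapping⟩ : PySem.Dict String (List String)) d with
  | none => false
  | some ts => ts.all (fun t => PySem.Set.contains (PySem.Set.ofList tags) t)

lemma pvCond_iff (tags ts : List String) :
    PySem.Set.len (PySem.Set.diff (PySem.Set.ofList ts) (PySem.Set.ofList tags)) = 0
      ↔ ts.all (fun t => PySem.Set.contains (PySem.Set.ofList tags) t) = true := by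
  simp [PySem.Set.len, PySem.Set.diff, PySem.Set.contains, List.length_eq_zero_iff,
    List.filter_eq_nil_iff, PySem.Set.mem_ofList]

-- A's pass-2 body is "append iff pvCond"
lemma pvStepLost_eq (tags : List String) (digest_tag_mapping : List (String × List String))
    (lost : List String) (d : String) :
    (match PySem.Dict.get? (⟨digest_tag_mapping⟩ : PySem.Dict String (List String)) d with
      | none => lost
      | some ts =>
        if PySem.Set.len (PySem.Set.diff (PySem.Set.ofList ts) (PySem.Set.ofList tags)) = 0
        then lost ++ [d] else lost)
    = if pvCond tags digest_tag_mapping d = true then lost ++ [d] else lost := by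
  unfold pvCond
  cases h : PySem.Dict.get? (⟨digest_tag_mapping⟩ : PySem.Dict String (List String)) d with
  | none => simp
  | some ts => exact if_congr (by rw [pvCond_iff tags ts]) rfl rfl

-- A's pass 1 is Set.ofList of the flattened references (B's candidates)
lemma pvRemove_eq (tags : List String) (tag_digest_mapping : List (String × List String)) :
    pvRemoveDigests tags tag_digest_mapping
      = PySem.Set.ofList (tags.flatMap (fun tag => PySem.Dict.getD ⟨tag_digest_mapping⟩ tag [])) := by
  unfold pvRemoveDigests
  rw [PySem.Set.ofList_eq_foldl, List.foldl_flatMap]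
  have hadd : (PySem.Set.add : PySem.Set String → String → PySem.Set String)
      = fun acc digest => if digest ∈ acc then acc else acc ++ [digest] :=
    funext fun s => funext fun x => PySem.Set.add_eq_ite s x
  rw [hadd]

-- origin of candidates
lemma pvCandidate_mem (tags : List String) (tag_digest_mapping : List (String × List String))
    (d : String) (h : d ∈ pvRemoveDigests tags tag_digest_mapping) :
    ∃ tag ∈ tags, d ∈ PySem.Dict.getD (⟨tag_digest_mapping⟩ : PySem.Dict String (List String)) tag [] := by
  rw [pvRemove_eq, PySem.Set.mem_ofList] at h
  simpa using List.mem_flatMap.mp h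

-- on keys present in a nodup-keyed digest_tag_mapping, B's safe-test is the negation of pvCond
lemma pvSafe_iff (tags : List String) (digest_tag_mapping : List (String × List String))
    (hnd : (digest_tag_mapping.map Prod.fst).Nodup) (d : String) (ts : List String)
    (h : PySem.Dict.get? (⟨digest_tag_mapping⟩ : PySem.Dict String (List String)) d = some ts) :
    (d ∈ PySem.Set.ofList ((digest_tag_mapping.filter
        (fun p => p.2.any (fun t => !(PySem.Set.contains (PySem.Set.ofList tags) t)))).map Prod.fst))
      ↔ ¬ (ts.all (fun t => PySem.Set.contains (PySem.Set.ofList tags) t) = true) := by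
  constructor
  · intro hmem
    rw [PySem.Set.mem_ofList] at hmem
    obtain ⟨p, hp, hpd⟩ := List.mem_map.mp hmem
    obtain ⟨hpdtm, hcond⟩ := List.mem_filter.mp hp
    have hget : PySem.Dict.get? (⟨digest_tag_mapping⟩ : PySem.Dict String (List String)) p.1 = some p.2 :=
      PySem.Dict.get?_of_mem_items (⟨digest_tag_mapping⟩ : PySem.Dict String (List String))
        (by simpa using hpdtm) (by simpa [PySem.Dict.keys] using hnd)
    rw [hpd, h] at hget
    have hts : p.2 = ts := by injection hget with hv; exact hv.symm
    rw [hts] at hcond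
    intro hall
    obtain ⟨t, htts, htc⟩ := List.any_eq_true.mp hcond
    have h2 := (PySem.Set.contains_iff _ _).mp (List.all_eq_true.mp hall t htts)
    rw [PySem.Set.mem_ofList] at h2
    simp [h2] at htc
  · intro hnall
    have hmemitems : (d, ts) ∈ digest_tag_mapping :=
      PySem.Dict.mem_items_of_get?_eq_some (⟨digest_tag_mapping⟩ : PySem.Dict String (List String)) h
    have hcond : ts.any (fun t => !(PySem.Set.contains (PySem.Set.ofList tags) t)) = true := by
      rw [List.any_eq_true]
      by_contra hno
      push Not at hno
      apply hnall
      rw [List.all_eq_true]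
      intro t ht
      have := hno t ht
      simpa using this
    rw [PySem.Set.mem_ofList]
    exact List.mem_map.mpr ⟨(d, ts), List.mem_filter.mpr ⟨hmemitems, hcond⟩, rfl⟩

-- ===== VERDICT =====
theorem get_lost_digests_spec : Claim_equal_get_lost_digests := by
  intro tags tdm dtm _ hpre
  obtain ⟨hsome, hnd⟩ := hpre
  simp only [Spec_get_lost_digests, get_lost_digests, get_lost_digests_alt]
  simp only [pvStepLost_eq tags dtm]
  have hfold : (pvRemoveDigests tags tdm).foldl
      (fun lost d => if pvCond tags dtm d = true then lost ++ [d] else lost) []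
      = (pvRemoveDigests tags tdm).filter (pvCond tags dtm) := by
    simpa using PySem.List.foldl_append_if (pvCond tags dtm) (fun x => x)
      (pvRemoveDigests tags tdm) []
  rw [hfold, PySem.List.dedup_eq_ofList, ← pvRemove_eq]
  apply List.filter_congr
  intro d hd
  obtain ⟨tag, htag, hdm⟩ := pvCandidate_mem tags tdm d hd
  obtain ⟨ts, hts⟩ := Option.isSome_iff_exists.mp (hsome tag htag d hdm)
  have hsafe := pvSafe_iff tags dtm hnd d ts hts
  simp only [pvCond, hts]
  set safeL := ((dtm.filter
      (fun p => p.2.any (fun t => !(PySem.Set.contains (PySem.Set.ofList tags) t)))).map Prod.fst) with hsL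
  by_cases hall : (ts.all (fun t => PySem.Set.contains (PySem.Set.ofList tags) t)) = true
  · have hnm : d ∉ PySem.Set.ofList safeL := fun hmem => (hsafe.mp hmem) hall
    have hcf : PySem.Set.contains (PySem.Set.ofList safeL) d = false := by
      rw [← Bool.not_eq_true, PySem.Set.contains_iff]; exact hnm
    rw [hall, hcf]; rfl
  · have hct : PySem.Set.contains (PySem.Set.ofList safeL) d = true :=
      (PySem.Set.contains_iff _ _).mpr (hsafe.mpr hall)
    rw [Bool.eq_false_iff.mpr hall, hct]; rfl
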